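-- pv_equiv track=rewrite | github.com/simon-glitch/simon-glitch.github.io | diary/2026/puzzle.py | make_str
-- ===== SOURCE A (Python) =====
-- def make_str(data: list[tuple[int, str, int]]):
--     # grid is a list of rows, top to bottom;
--     # each row is a list of characters, left to right;
--     # ' ' (space) means that character is not empty
--     grid = []
--     w = 0
--     h = 0
--     for (x, char, y) in data:
--         if(y + 1 > h):
--             grid += [[' '] * w for _ in range(y + 1 - h)]
--             h = y + 1
--         if(x + 1 > w):
--             for i in range(h):
--                 grid[i] += [' '] * (x + 1 - w)
--             w = x + 1
--         grid[y][x] = char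
--     return '\n'.join(''.join(row) for row in grid)
-- ===== SOURCE B (Python) =====
-- def make_str(data: list[tuple[int, str, int]]):
--     # Two-pass: size the grid once from the maxima, then place every character.
--     w = max((x + 1 for (x, _, _) in data), default=0)
--     h = max((y + 1 for (_, _, y) in data), default=0)
--     grid = [[' '] * w for _ in range(h)]
--     for (x, char, y) in data:
--         grid[y][x] = char
--     return '\n'.join(''.join(row) for row in grid)
-- ===== Notes on version B (the rewrite author's own statement) =====
-- stated objective: simpler
-- what changed: B replaces A's interleaved monotonic grid-growing (appending rows and padding every row whenever a coordinate exceeds the current size) with a plain two-pass algorithm: compute the final width/height by max, allocate the full grid of spaces once, then place each character.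
-- outside the precondition, e.g. on make_str([(0, 'a', 0), (-1, 'b', 0), (2, 'c', 0)]): A returns 'b c', B returns 'a c'
import Mathlib
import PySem

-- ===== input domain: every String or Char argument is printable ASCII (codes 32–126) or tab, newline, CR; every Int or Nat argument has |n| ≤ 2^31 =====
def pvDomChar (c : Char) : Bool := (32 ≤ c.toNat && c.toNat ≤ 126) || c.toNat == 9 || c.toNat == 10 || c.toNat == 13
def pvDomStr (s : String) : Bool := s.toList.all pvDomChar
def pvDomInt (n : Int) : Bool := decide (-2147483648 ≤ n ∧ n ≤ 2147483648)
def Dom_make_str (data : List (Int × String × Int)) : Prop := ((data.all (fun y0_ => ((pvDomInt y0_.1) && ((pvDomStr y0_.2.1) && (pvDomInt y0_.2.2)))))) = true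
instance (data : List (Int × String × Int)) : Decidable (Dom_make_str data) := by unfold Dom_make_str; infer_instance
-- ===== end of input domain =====

-- B re-sizes the grid once by two maxima and then places each character, instead of A's
-- interleaved monotonic grid growing; same cost, simpler shape (objective: simpler).

-- ===== PORT A =====

-- grid[y][x] = char  (shared by both ports: both sources contain this exact statement).
-- Python raises IndexError when grid[y] is out of range (the 'none' arm) or when x is out of
-- range for the row (pySetD leaves the row unchanged there); both are excluded by Pre_make_str.
def pvSetCell (g : List (List String)) (y x : Int) (c : String) : List (List String) :=
  match PySem.List.pyGet? g y with
  | some row => PySem.List.pySetD g y (PySem.List.pySetD row x c)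
  | none => g

-- grid += [[' '] * w for _ in range(k)]
def pvGrowRows (grid : List (List String)) (w k : Int) : List (List String) :=
  grid ++ (PySem.List.pyRange 0 k).map (fun _ => PySem.List.pyRepeat [" "] w)

-- for i in range(h): grid[i] += [' '] * d   (the 'none' arm is Python's IndexError, unreachable
-- in A since h == len(grid) there)
def pvGrowCols (grid : List (List String)) (h d : Int) : List (List String) :=
  (PySem.List.pyRange 0 h).foldl (fun g i =>
    match PySem.List.pyGet? g i with
    | some row => PySem.List.pySetD g i (row ++ PySem.List.pyRepeat [" "] d)
    | none => g) grid

-- one iteration of A's for-loop over data, state (grid, w, h)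
def pvStepA (s : List (List String) × Int × Int) (t : Int × String × Int) :
    List (List String) × Int × Int :=
  let (x, char, y) := t
  let (grid, w, h) := s
  let (grid, h) := if y + 1 > h then (pvGrowRows grid w (y + 1 - h), y + 1) else (grid, h)
  let (grid, w) := if x + 1 > w then (pvGrowCols grid h (x + 1 - w), x + 1) else (grid, w)
  (pvSetCell grid y x char, w, h)

def make_str (data : List (Int × String × Int)) : String :=
  let s := data.foldl pvStepA ([], 0, 0)
  PySem.Str.join "\n" (s.1.map (fun row => PySem.Str.join "" row))

-- ===== PORT B =====
def make_str_alt (data : List (Int × String × Int)) : String :=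
  let w := PySem.List.maxD (data.map (fun t => t.1 + 1)) (fun v => v) 0
  let h := PySem.List.maxD (data.map (fun t => t.2.2 + 1)) (fun v => v) 0
  let grid := (PySem.List.pyRange 0 h).map (fun _ => PySem.List.pyRepeat [" "] w)
  let grid := data.foldl (fun g t => pvSetCell g t.2.2 t.1 t.2.1) grid
  PySem.Str.join "\n" (grid.map (fun row => PySem.Str.join "" row))

-- ===== PRECONDITION & SPEC =====
-- Pre_ excludes data containing a negative x or y coordinate: there A raises IndexError whenever
-- the wrapped negative index misses the partially-grown grid, and where it does return, the
-- negative index was resolved against the grid as grown so far — an accident of A's monotonic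
-- growth (B resolves it against the full-size grid, so both values are mere wraparound artefacts).
def Pre_make_str (data : List (Int × String × Int)) : Prop :=
  ∀ t ∈ data, 0 ≤ t.1 ∧ 0 ≤ t.2.2
instance (data : List (Int × String × Int)) : Decidable (Pre_make_str data) := by
  unfold Pre_make_str; infer_instance

def pvWitness_make_str : (List (Int × String × Int)) := [(0, "a", 0), (2, "b", 1), (0, "c", 0)]

def Spec_make_str (data : List (Int × String × Int)) (out : String) : Prop := out = make_str_alt data
instance (data : List (Int × String × Int)) (out : String) : Decidable (Spec_make_str data out) := by
  unfold Spec_make_str; infer_instance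

-- ===== CLAIM (what is proved, stated in full; the proofs are below) =====
def Claim_equal_make_str : Prop := ∀ (data : List (Int × String × Int)), Dom_make_str data → Pre_make_str data → Spec_make_str data (make_str data)

-- ===== LEMMAS AND PROOFS =====

-- running maxima of A's loop / the two maxima of B
def pvW (p : List (Int × String × Int)) : Int := p.foldl (fun m t => max m (t.1 + 1)) 0
def pvH (p : List (Int × String × Int)) : Int := p.foldl (fun m t => max m (t.2.2 + 1)) 0
-- the h×w grid of spaces and an in-range write, the common value both loops compute
def pvBlank (w h : Nat) : List (List String) := List.replicate h (List.replicate w " ")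
def pvWrite (g : List (List String)) (x y : Nat) (c : String) : List (List String) :=
  g.modify y (fun row => row.set x c)
def pvPaint (g : List (List String)) (p : List (Int × String × Int)) : List (List String) :=
  p.foldl (fun g t => pvWrite g t.1.toNat t.2.2.toNat t.2.1) g
-- every row has length w
def pvRect (g : List (List String)) (w : Nat) : Prop :=
  ∀ i (hi : i < g.length), g[i].length = w

theorem pvW_nonneg (p : List (Int × String × Int)) : 0 ≤ pvW p :=
  (PySem.List.le_foldl_max_int p (fun t => t.1 + 1) 0).1
theorem pvH_nonneg (p : List (Int × String × Int)) : 0 ≤ pvH p :=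
  (PySem.List.le_foldl_max_int p (fun t => t.2.2 + 1) 0).1
theorem pvW_le {p : List (Int × String × Int)} {t} (ht : t ∈ p) : t.1 + 1 ≤ pvW p :=
  (PySem.List.le_foldl_max_int p (fun t => t.1 + 1) 0).2 t ht
theorem pvH_le {p : List (Int × String × Int)} {t} (ht : t ∈ p) : t.2.2 + 1 ≤ pvH p :=
  (PySem.List.le_foldl_max_int p (fun t => t.2.2 + 1) 0).2 t ht
theorem pvW_append (p : List (Int × String × Int)) (t) : pvW (p ++ [t]) = max (pvW p) (t.1 + 1) := by
  simp [pvW, List.foldl_append]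
theorem pvH_append (p : List (Int × String × Int)) (t) : pvH (p ++ [t]) = max (pvH p) (t.2.2 + 1) := by
  simp [pvH, List.foldl_append]

theorem pvLen_write (g : List (List String)) (x y : Nat) (c : String) :
    (pvWrite g x y c).length = g.length := by
  simp [pvWrite]

theorem pvRect_write {g : List (List String)} {w : Nat} (hg : pvRect g w) (x y : Nat) (c : String) :
    pvRect (pvWrite g x y c) w := by
  intro i hi
  have hi' : i < g.length := by simpa [pvWrite] using hi
  simp only [pvWrite, List.getElem_modify]
  split_ifs with h
  · simp [hg i hi']
  · exact hg i hi'

theorem pvLen_paint (g : List (List String)) (p : List (Int × String × Int)) :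
    (pvPaint g p).length = g.length := by
  induction p generalizing g with
  | nil => rfl
  | cons t p ih => simp [pvPaint] at ih ⊢; rw [ih, pvLen_write]

theorem pvRect_blank (w h : Nat) : pvRect (pvBlank w h) w := by
  intro i hi; simp [pvBlank]

theorem pvLen_blank (w h : Nat) : (pvBlank w h).length = h := by simp [pvBlank]

-- grid[y][x] = char is the plain in-range write when 0 ≤ x, 0 ≤ y < len(grid)
theorem pvSetCell_eq_write {g : List (List String)} {y x : Int} (c : String)
    (hx : 0 ≤ x) (hy : 0 ≤ y) (hyl : y < (g.length : Int)) :
    pvSetCell g y x c = pvWrite g x.toNat y.toNat c := by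
  unfold pvSetCell
  rw [PySem.List.pyGet?_eq_some_getElem g hy hyl]
  dsimp only
  rw [PySem.List.pySetD_of_nonneg _ _ hy, PySem.List.pySetD_of_nonneg _ _ hx]
  unfold pvWrite
  rw [List.modify_eq_set]
  congr 1
  rw [List.getElem?_eq_getElem (by omega)]
  rfl

theorem pvWrite_append {g e : List (List String)} {x y : Nat} {c : String} (hy : y < g.length) :
    pvWrite g x y c ++ e = pvWrite (g ++ e) x y c := by
  apply List.ext_getElem (by simp [pvWrite])
  intro i h1 h2
  by_cases hig : i < g.length
  · rw [List.getElem_append_left (by simpa [pvWrite] using hig)]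
    simp only [pvWrite, List.getElem_modify]
    rw [List.getElem_append_left hig]
  · have hig' : ¬ i < (pvWrite g x y c).length := by simpa [pvWrite] using hig
    rw [List.getElem_append_right (by omega)]
    simp only [pvWrite, List.getElem_modify]
    rw [if_neg (by omega)]
    rw [List.getElem_append_right (by omega)]
    simp

theorem pvPaint_append {g e : List (List String)} {p : List (Int × String × Int)}
    (hp : ∀ t ∈ p, t.2.2.toNat < g.length) :
    pvPaint g p ++ e = pvPaint (g ++ e) p := by
  induction p generalizing g with
  | nil => rfl
  | cons t p ih =>
    simp only [pvPaint, List.foldl_cons] at *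
    rw [ih (fun t' ht' => by
          rw [pvLen_write]; exact hp t' (List.mem_cons_of_mem _ ht')),
        pvWrite_append (hp t (List.mem_cons_self ..))]

theorem pvWrite_map {g : List (List String)} {w : Nat} (hg : pvRect g w) {x y : Nat} {c : String}
    (hx : x < w) (e : List String) :
    (pvWrite g x y c).map (fun r => r ++ e) = pvWrite (g.map (fun r => r ++ e)) x y c := by
  apply List.ext_getElem (by simp [pvWrite])
  intro i h1 h2
  have hig : i < g.length := by simpa [pvWrite] using h1
  rw [List.getElem_map]
  simp only [pvWrite, List.getElem_modify]
  split_ifs with hyi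
  · rw [List.getElem_map]
    rw [List.set_append]
    rw [if_pos (by rw [hg i hig]; exact hx)]
  · rw [List.getElem_map]

theorem pvPaint_map {g : List (List String)} {w : Nat} (hg : pvRect g w)
    {p : List (Int × String × Int)} (hp : ∀ t ∈ p, t.1.toNat < w) (e : List String) :
    (pvPaint g p).map (fun r => r ++ e) = pvPaint (g.map (fun r => r ++ e)) p := by
  induction p generalizing g with
  | nil => rfl
  | cons t p ih =>
    simp only [pvPaint, List.foldl_cons] at *
    rw [ih (pvRect_write hg _ _ _) (fun t' ht' => hp t' (List.mem_cons_of_mem _ ht')),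
        pvWrite_map hg (hp t (List.mem_cons_self ..)) e]

-- [[' '] * w for _ in range(k)] is k.toNat rows of w.toNat spaces
theorem pvRange_map_const {α : Type} (k : Int) (r : α) :
    (PySem.List.pyRange 0 k).map (fun _ => r) = List.replicate k.toNat r := by
  suffices h : ∀ (n : Nat) (k : Int), k.toNat = n →
      (PySem.List.pyRange 0 k).map (fun _ => r) = List.replicate k.toNat r from
    h k.toNat k rfl
  intro n
  induction n with
  | zero =>
    intro k hk
    rw [PySem.List.pyRange_one_eq_nil (by omega), hk]
    rfl
  | succ n ih =>
    intro k hk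
    have h1 : k = (k - 1) + 1 := by ring
    rw [h1, PySem.List.pyRange_one_succ_right (by omega), List.map_append,
        ih (k - 1) (by omega)]
    rw [show (k - 1 + 1).toNat = (k-1).toNat + 1 by omega]
    simp [List.replicate_succ']

theorem pvBlank_add (w h k : Nat) :
    pvBlank w h ++ List.replicate k (List.replicate w " ") = pvBlank w (h + k) := by
  simp [pvBlank, List.replicate_append_replicate]

theorem pvBlank_pad (w h d : Nat) :
    (pvBlank w h).map (fun r => r ++ List.replicate d " ") = pvBlank (w + d) h := by
  simp [pvBlank, List.map_replicate, List.replicate_append_replicate]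

-- the column-growth loop pads every row (h = len(grid), as in A)
theorem pvGrowCols_step (pre rest : List (List String)) (row : List String) (d : Int) :
    (match PySem.List.pyGet? (pre ++ row :: rest) ((pre.length : Nat) : Int) with
     | some r => PySem.List.pySetD (pre ++ row :: rest) ((pre.length : Nat) : Int)
                   (r ++ PySem.List.pyRepeat [" "] d)
     | none => pre ++ row :: rest) =
      pre ++ (row ++ List.replicate d.toNat " ") :: rest := by
  rw [PySem.List.pyGet?_append_length]
  dsimp only
  rw [PySem.List.pySetD_of_nonneg _ _ (Int.natCast_nonneg _), Int.toNat_natCast]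
  rw [List.set_append, if_neg (by omega)]
  simp [PySem.List.pyRepeat_singleton]

theorem pvGrowCols_take (g : List (List String)) (d : Int) :
    ∀ k : Nat, k ≤ g.length →
      pvGrowCols g (k : Int) d =
        (g.take k).map (fun r => r ++ List.replicate d.toNat " ") ++ g.drop k := by
  intro k
  induction k with
  | zero =>
    intro _
    unfold pvGrowCols
    rw [show ((0:Nat):Int) = (0:Int) by simp, PySem.List.pyRange_one_eq_nil (le_refl 0)]
    simp
  | succ k ih =>
    intro hk
    have hklen : k < g.length := by omega
    unfold pvGrowCols at ih ⊢
    rw [show ((k+1:Nat):Int) = (k:Int)+1 by push_cast; ring]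
    rw [PySem.List.pyRange_one_succ_right (by positivity), List.foldl_append,
        ih (by omega)]
    simp only [List.foldl_cons, List.foldl_nil]
    have hprelen : ((g.take k).map (fun r => r ++ List.replicate d.toNat " ")).length = k := by
      simp [List.length_take]; omega
    rw [List.drop_eq_getElem_cons hklen]
    rw [show (k:Int) = ((((g.take k).map (fun r => r ++ List.replicate d.toNat " ")).length : Nat) : Int) by rw [hprelen]]
    rw [pvGrowCols_step]
    rw [List.take_add_one, List.getElem?_eq_getElem hklen]
    simp
    rw [List.take_add_one]
    simp [List.getElem?_map, List.getElem?_eq_getElem hklen]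

theorem pvGrowCols_eq_map (g : List (List String)) (d : Int) {n : Int} (hn : n = (g.length : Int)) :
    pvGrowCols g n d = g.map (fun r => r ++ List.replicate d.toNat " ") := by
  rw [hn, pvGrowCols_take g d g.length (le_refl _)]
  simp


-- max(vs, default=0) is the running max from 0 when all values are nonnegative
theorem pvMaxD_eq_foldl (p : List (Int × String × Int)) (f : Int × String × Int → Int)
    (hf : ∀ t ∈ p, 0 ≤ f t) :
    PySem.List.maxD (p.map f) (fun v => v) 0 = p.foldl (fun m t => max m (f t)) 0 := by
  cases p with
  | nil => rfl
  | cons a t =>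
    simp only [List.map_cons, PySem.List.maxD, PySem.List.max?_id_cons, Option.getD_some]
    rw [List.foldl_map, List.foldl_cons,
        max_eq_right (hf a (List.mem_cons_self ..))]

-- A's loop invariant: the state after a prefix is the painted blank grid of the running maxima
theorem pvLoopA (p : List (Int × String × Int)) (hp : ∀ t ∈ p, 0 ≤ t.1 ∧ 0 ≤ t.2.2) :
    p.foldl pvStepA ([], 0, 0) = (pvPaint (pvBlank (pvW p).toNat (pvH p).toNat) p, pvW p, pvH p) := by
  induction p using List.reverseRecOn with
  | nil => rfl
  | append_singleton p t ih =>
    obtain ⟨x, c, y⟩ := t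
    have hp' : ∀ t ∈ p, 0 ≤ t.1 ∧ 0 ≤ t.2.2 := fun t ht => hp t (by simp [ht])
    have hx : 0 ≤ x := (hp (x,c,y) (by simp)).1
    have hy : 0 ≤ y := (hp (x,c,y) (by simp)).2
    have hw0 := pvW_nonneg p
    have hh0 := pvH_nonneg p
    have hbx : ∀ t ∈ p, t.1.toNat < (pvW p).toNat := fun t ht => by
      have h1 := pvW_le ht; have h2 := (hp' t ht).1; omega
    have hby : ∀ t ∈ p, t.2.2.toNat < (pvH p).toNat := fun t ht => by
      have h1 := pvH_le ht; have h2 := (hp' t ht).2; omega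
    rw [List.foldl_append, ih hp', List.foldl_cons, List.foldl_nil]
    rw [pvW_append, pvH_append]
    simp only [pvStepA]
    have hstage1 :
        (if y + 1 > pvH p then
            (pvGrowRows (pvPaint (pvBlank (pvW p).toNat (pvH p).toNat) p) (pvW p) (y + 1 - pvH p), y + 1)
          else (pvPaint (pvBlank (pvW p).toNat (pvH p).toNat) p, pvH p))
        = (pvPaint (pvBlank (pvW p).toNat (max (pvH p) (y + 1)).toNat) p, max (pvH p) (y + 1)) := by
      split_ifs with h1
      · rw [max_eq_right (by omega)]
        unfold pvGrowRows
        rw [pvRange_map_const, PySem.List.pyRepeat_singleton]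
        rw [pvPaint_append (by rw [pvLen_blank]; exact hby)]
        rw [pvBlank_add]
        rw [show (pvH p).toNat + (y + 1 - pvH p).toNat = (y + 1).toNat by omega]
      · rw [max_eq_left (by omega)]
    rw [hstage1]
    have hstage2 : ∀ G : List (List String), G = pvPaint (pvBlank (pvW p).toNat (max (pvH p) (y + 1)).toNat) p →
        (if x + 1 > pvW p then (pvGrowCols G (max (pvH p) (y + 1)) (x + 1 - pvW p), x + 1)
          else (G, pvW p))
        = (pvPaint (pvBlank (max (pvW p) (x + 1)).toNat (max (pvH p) (y + 1)).toNat) p, max (pvW p) (x + 1)) := by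
      intro G hG
      split_ifs with h2
      · rw [show max (pvW p) (x + 1) = x + 1 from max_eq_right (by omega)]
        rw [pvGrowCols_eq_map G (x + 1 - pvW p)
              (by rw [hG, pvLen_paint, pvLen_blank,
                      Int.toNat_of_nonneg (le_trans hh0 (le_max_left _ _))])]
        rw [hG]
        rw [pvPaint_map (pvRect_blank _ _) hbx]
        rw [pvBlank_pad]
        rw [show (pvW p).toNat + (x + 1 - pvW p).toNat = (x + 1).toNat by omega]
      · rw [show max (pvW p) (x + 1) = pvW p from max_eq_left (by omega), hG]
    rw [hstage2 _ rfl]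
    have hfin : pvSetCell (pvPaint (pvBlank (max (pvW p) (x + 1)).toNat (max (pvH p) (y + 1)).toNat) p) y x c
        = pvWrite (pvPaint (pvBlank (max (pvW p) (x + 1)).toNat (max (pvH p) (y + 1)).toNat) p) x.toNat y.toNat c := by
      apply pvSetCell_eq_write c hx hy
      rw [pvLen_paint, pvLen_blank]; omega
    rw [hfin]
    simp [pvPaint, List.foldl_append]

-- B's loop is the same painting of the same blank grid
theorem pvLoopB (p : List (Int × String × Int)) (g : List (List String))
    (hp : ∀ t ∈ p, 0 ≤ t.1 ∧ 0 ≤ t.2.2 ∧ t.2.2 < (g.length : Int)) :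
    p.foldl (fun g t => pvSetCell g t.2.2 t.1 t.2.1) g = pvPaint g p := by
  induction p generalizing g with
  | nil => rfl
  | cons t p ih =>
    obtain ⟨ht, hp'⟩ := List.forall_mem_cons.mp hp
    simp only [pvPaint, List.foldl_cons]
    rw [pvSetCell_eq_write t.2.1 ht.1 ht.2.1 ht.2.2]
    exact ih _ (fun t' ht' => by
      rw [pvLen_write]; exact hp' t' ht')

-- ===== VERDICT (by name: the statement is the Claim_ definition above) =====
theorem make_str_spec : Claim_equal_make_str := by
  intro data _ hpre
  unfold Pre_make_str at hpre
  unfold Spec_make_str make_str make_str_alt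
  dsimp only
  have hH := pvH_nonneg data
  have hw : PySem.List.maxD (data.map (fun t => t.1 + 1)) (fun v => v) 0 = pvW data :=
    pvMaxD_eq_foldl data (fun t => t.1 + 1) (fun t ht => by show (0:Int) ≤ t.1 + 1; have := (hpre t ht).1; omega)
  have hh : PySem.List.maxD (data.map (fun t => t.2.2 + 1)) (fun v => v) 0 = pvH data :=
    pvMaxD_eq_foldl data (fun t => t.2.2 + 1) (fun t ht => by show (0:Int) ≤ t.2.2 + 1; have := (hpre t ht).2; omega)
  rw [pvLoopA data hpre, hw, hh]
  rw [show (PySem.List.pyRange 0 (pvH data)).map (fun _ => PySem.List.pyRepeat [" "] (pvW data))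
        = pvBlank (pvW data).toNat (pvH data).toNat by
      rw [pvRange_map_const, PySem.List.pyRepeat_singleton]; rfl]
  rw [pvLoopB data _ (fun t ht => ⟨(hpre t ht).1, (hpre t ht).2, by
      rw [pvLen_blank, Int.toNat_of_nonneg hH]
      have h1 := pvH_le ht; omega⟩)]
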